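-- pv_equiv track=rewrite | github.com/sanjayvinayak2711/agentic-rag | backend/main.py | group_sentences_by_topic
-- ===== SOURCE A (Python) =====
-- def group_sentences_by_topic(sentences: list, intent: str) -> dict:
--     """Group sentences by their topic based on intent"""
--     topics = {
--         "main_description": [],
--         "features": [],
--         "use_cases": [],
--         "performance": [],
--         "size": [],
--         "other": []
--     }
--
--     for sentence in sentences:
--         sentence_lower = sentence.lower()
--
--         if "sample pdf" in sentence_lower or "testing" in sentence_lower:
--             topics["main_description"].append(sentence)
--         elif "quick" in sentence_lower or "fast" in sentence_lower or "lightweight" in sentence_lower: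
--             topics["features"].append(sentence)
--         elif "email" in sentence_lower or "rendering" in sentence_lower or "mobile" in sentence_lower or "bandwidth" in sentence_lower:
--             topics["use_cases"].append(sentence)
--         elif "download" in sentence_lower or "speed" in sentence_lower:
--             topics["performance"].append(sentence)
--         elif "size" in sentence_lower or "storage" in sentence_lower or "small" in sentence_lower:
--             topics["size"].append(sentence)
--         else:
--             topics["other"].append(sentence)
--
--     return topics
-- ===== SOURCE B (Python) =====
-- RULES = [
--     ("main_description", ["sample pdf", "testing"]),
--     ("features", ["quick", "fast", "lightweight"]),
--     ("use_cases", ["email", "rendering", "mobile", "bandwidth"]),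
--     ("performance", ["download", "speed"]),
--     ("size", ["size", "storage", "small"]),
-- ]
--
-- TOPIC_NAMES = [name for name, _ in RULES] + ["other"]
--
--
-- def _classify(sentence):
--     sentence_lower = sentence.lower()
--     for name, keywords in RULES:
--         if any(kw in sentence_lower for kw in keywords):
--             return name
--     return "other"
--
--
-- def group_sentences_by_topic(sentences: list, intent: str) -> dict:
--     """Group sentences by their topic based on intent"""
--     return {name: [s for s in sentences if _classify(s) == name]
--             for name in TOPIC_NAMES}
-- ===== Notes on version B (the rewrite author's own statement) =====
-- stated objective: simpler
-- what changed: Replaces the single-pass if/elif cascade that mutates six dict buckets with a data-driven rule table plus a classify helper, building each bucket as a comprehension filtering the sentences by their classified topic.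
import Mathlib
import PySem

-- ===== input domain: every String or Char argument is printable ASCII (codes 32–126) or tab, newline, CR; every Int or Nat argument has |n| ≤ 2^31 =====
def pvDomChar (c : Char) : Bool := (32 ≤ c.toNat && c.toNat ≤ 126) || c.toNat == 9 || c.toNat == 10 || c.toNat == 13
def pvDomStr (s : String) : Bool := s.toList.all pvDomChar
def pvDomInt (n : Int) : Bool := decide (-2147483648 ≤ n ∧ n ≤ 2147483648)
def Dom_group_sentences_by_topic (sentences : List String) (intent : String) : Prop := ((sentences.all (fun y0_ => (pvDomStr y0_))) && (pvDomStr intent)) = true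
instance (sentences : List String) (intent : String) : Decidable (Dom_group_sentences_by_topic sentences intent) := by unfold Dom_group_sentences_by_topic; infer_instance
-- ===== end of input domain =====

-- B replaces A's if/elif cascade mutating six dict buckets by a rule table + classify
-- helper, building each bucket by filtering the sentences (objective: simpler).

-- ===== PORT A =====
-- topics[key].append(sentence): append to the bucket of the (unique) matching key
def pvAppendTo (d : List (String × List String)) (k s : String) : List (String × List String) :=
  match d with
  | [] => []
  | (k', v) :: rest => if k' == k then (k', v ++ [s]) :: rest else (k', v) :: pvAppendTo rest k s

def pvStepA (d : List (String × List String)) (sentence : String) : List (String × List String) :=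
  let sl := PySem.Str.lower sentence
  if PySem.Str.isIn "sample pdf" sl || PySem.Str.isIn "testing" sl then
    pvAppendTo d "main_description" sentence
  else if PySem.Str.isIn "quick" sl || PySem.Str.isIn "fast" sl || PySem.Str.isIn "lightweight" sl then
    pvAppendTo d "features" sentence
  else if PySem.Str.isIn "email" sl || PySem.Str.isIn "rendering" sl || PySem.Str.isIn "mobile" sl || PySem.Str.isIn "bandwidth" sl then
    pvAppendTo d "use_cases" sentence
  else if PySem.Str.isIn "download" sl || PySem.Str.isIn "speed" sl then
    pvAppendTo d "performance" sentence
  else if PySem.Str.isIn "size" sl || PySem.Str.isIn "storage" sl || PySem.Str.isIn "small" sl then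
    pvAppendTo d "size" sentence
  else
    pvAppendTo d "other" sentence

def group_sentences_by_topic (sentences : List String) (intent : String) : List (String × List String) :=
  sentences.foldl pvStepA
    [("main_description", []), ("features", []), ("use_cases", []),
     ("performance", []), ("size", []), ("other", [])]

-- ===== PORT B =====
def pvRules : List (String × List String) :=
  [("main_description", ["sample pdf", "testing"]),
   ("features", ["quick", "fast", "lightweight"]),
   ("use_cases", ["email", "rendering", "mobile", "bandwidth"]),
   ("performance", ["download", "speed"]),
   ("size", ["size", "storage", "small"])]

def pvTopicNames : List String := pvRules.map (·.1) ++ ["other"]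

def pvClassify (sentence : String) : String :=
  let sl := PySem.Str.lower sentence
  match pvRules.find? (fun r => r.2.any (fun kw => PySem.Str.isIn kw sl)) with
  | some r => r.1
  | none => "other"

def group_sentences_by_topic_alt (sentences : List String) (intent : String) : List (String × List String) :=
  pvTopicNames.map (fun name => (name, sentences.filter (fun s => pvClassify s == name)))

-- ===== PRECONDITION & SPEC =====
def Spec_group_sentences_by_topic (sentences : List String) (intent : String) (out : List (String × List String)) : Prop := out = group_sentences_by_topic_alt sentences intent
instance (sentences : List String) (intent : String) (out : List (String × List String)) : Decidable (Spec_group_sentences_by_topic sentences intent out) := by unfold Spec_group_sentences_by_topic; infer_instance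

-- ===== CLAIM (what is proved, stated in full; the proofs are below) =====
def Claim_equal_group_sentences_by_topic : Prop := ∀ (sentences : List String) (intent : String), Dom_group_sentences_by_topic sentences intent → Spec_group_sentences_by_topic sentences intent (group_sentences_by_topic sentences intent)

-- ===== LEMMAS AND PROOFS =====

-- pvClassify, unfolded, is the same keyword cascade A's if/elif chain tests
lemma pvClassify_eq (s : String) :
    pvClassify s =
      (if PySem.Str.isIn "sample pdf" (PySem.Str.lower s) || PySem.Str.isIn "testing" (PySem.Str.lower s) then "main_description"
       else if PySem.Str.isIn "quick" (PySem.Str.lower s) || PySem.Str.isIn "fast" (PySem.Str.lower s) || PySem.Str.isIn "lightweight" (PySem.Str.lower s) then "features"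
       else if PySem.Str.isIn "email" (PySem.Str.lower s) || PySem.Str.isIn "rendering" (PySem.Str.lower s) || PySem.Str.isIn "mobile" (PySem.Str.lower s) || PySem.Str.isIn "bandwidth" (PySem.Str.lower s) then "use_cases"
       else if PySem.Str.isIn "download" (PySem.Str.lower s) || PySem.Str.isIn "speed" (PySem.Str.lower s) then "performance"
       else if PySem.Str.isIn "size" (PySem.Str.lower s) || PySem.Str.isIn "storage" (PySem.Str.lower s) || PySem.Str.isIn "small" (PySem.Str.lower s) then "size"
       else "other") := by
  unfold pvClassify pvRules
  simp only [List.find?_cons, List.any_cons, List.any_nil]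
  cases h0 : (PySem.Str.isIn "sample pdf" (PySem.Str.lower s))
  · cases h1 : (PySem.Str.isIn "testing" (PySem.Str.lower s))
    · cases h2 : (PySem.Str.isIn "quick" (PySem.Str.lower s))
      · cases h3 : (PySem.Str.isIn "fast" (PySem.Str.lower s))
        · cases h4 : (PySem.Str.isIn "lightweight" (PySem.Str.lower s))
          · cases h5 : (PySem.Str.isIn "email" (PySem.Str.lower s))
            · cases h6 : (PySem.Str.isIn "rendering" (PySem.Str.lower s))
              · cases h7 : (PySem.Str.isIn "mobile" (PySem.Str.lower s))
                · cases h8 : (PySem.Str.isIn "bandwidth" (PySem.Str.lower s))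
                  · cases h9 : (PySem.Str.isIn "download" (PySem.Str.lower s))
                    · cases h10 : (PySem.Str.isIn "speed" (PySem.Str.lower s))
                      · cases h11 : (PySem.Str.isIn "size" (PySem.Str.lower s))
                        · cases h12 : (PySem.Str.isIn "storage" (PySem.Str.lower s))
                          · cases h13 : (PySem.Str.isIn "small" (PySem.Str.lower s))
                            · simp
                            · simp
                          · simp
                        · simp
                      · simp
                    · simp
                  · simp
                · simp
              · simp
            · simp
          · simp
        · simp
      · simp
    · simp
  · simp

-- one A-step on a canonical six-bucket state appends s to the bucket B classifies it into
lemma pvStepA_canon (f : String → List String) (s : String) :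
    pvStepA (pvTopicNames.map (fun k => (k, f k))) s
      = pvTopicNames.map (fun k => (k, f k ++ if pvClassify s == k then [s] else [])) := by
  simp only [pvClassify_eq, pvStepA]
  cases h0 : (PySem.Str.isIn "sample pdf" (PySem.Str.lower s))
  · cases h1 : (PySem.Str.isIn "testing" (PySem.Str.lower s))
    · cases h2 : (PySem.Str.isIn "quick" (PySem.Str.lower s))
      · cases h3 : (PySem.Str.isIn "fast" (PySem.Str.lower s))
        · cases h4 : (PySem.Str.isIn "lightweight" (PySem.Str.lower s))
          · cases h5 : (PySem.Str.isIn "email" (PySem.Str.lower s))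
            · cases h6 : (PySem.Str.isIn "rendering" (PySem.Str.lower s))
              · cases h7 : (PySem.Str.isIn "mobile" (PySem.Str.lower s))
                · cases h8 : (PySem.Str.isIn "bandwidth" (PySem.Str.lower s))
                  · cases h9 : (PySem.Str.isIn "download" (PySem.Str.lower s))
                    · cases h10 : (PySem.Str.isIn "speed" (PySem.Str.lower s))
                      · cases h11 : (PySem.Str.isIn "size" (PySem.Str.lower s))
                        · cases h12 : (PySem.Str.isIn "storage" (PySem.Str.lower s))
                          · cases h13 : (PySem.Str.isIn "small" (PySem.Str.lower s))
                            · simp [pvAppendTo, pvTopicNames, pvRules]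
                            · simp [pvAppendTo, pvTopicNames, pvRules]
                          · simp [pvAppendTo, pvTopicNames, pvRules]
                        · simp [pvAppendTo, pvTopicNames, pvRules]
                      · simp [pvAppendTo, pvTopicNames, pvRules]
                    · simp [pvAppendTo, pvTopicNames, pvRules]
                  · simp [pvAppendTo, pvTopicNames, pvRules]
                · simp [pvAppendTo, pvTopicNames, pvRules]
              · simp [pvAppendTo, pvTopicNames, pvRules]
            · simp [pvAppendTo, pvTopicNames, pvRules]
          · simp [pvAppendTo, pvTopicNames, pvRules]
        · simp [pvAppendTo, pvTopicNames, pvRules]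
      · simp [pvAppendTo, pvTopicNames, pvRules]
    · simp [pvAppendTo, pvTopicNames, pvRules]
  · simp [pvAppendTo, pvTopicNames, pvRules]

lemma pvFoldA_canon (l : List String) (f : String → List String) :
    l.foldl pvStepA (pvTopicNames.map (fun k => (k, f k)))
      = pvTopicNames.map (fun k => (k, f k ++ l.filter (fun s => pvClassify s == k))) := by
  induction l generalizing f with
  | nil => simp
  | cons s t ih =>
    simp only [List.foldl_cons]
    rw [pvStepA_canon]
    rw [ih (fun k => f k ++ if pvClassify s == k then [s] else [])]
    apply List.map_congr_left
    intro k _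
    simp only [List.filter_cons]
    by_cases h : (pvClassify s == k) = true <;> simp [h]

-- ===== VERDICT (by name: the statement is the Claim_ definition above) =====
theorem group_sentences_by_topic_spec : Claim_equal_group_sentences_by_topic := by
  intro sentences intent _
  unfold Spec_group_sentences_by_topic group_sentences_by_topic group_sentences_by_topic_alt
  have h := pvFoldA_canon sentences (fun _ => [])
  simpa [pvTopicNames, pvRules] using h
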